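-- pv_equiv track=rewrite | github.com/rocke2020/Firefly | data_process/preprocess/ner/create_sft_data.py | split_with_span_index
-- ===== SOURCE A (Python) =====
-- def split_with_span_index(sentence: str):
--     words = sentence.split()
--     search_start = 0
--     out = []
--     for word in words:
--         start = sentence.find(word, search_start)
--         end = start + len(word)
--         out.append((word, start, end))
--         search_start = end
--     return out
-- ===== SOURCE B (Python) =====
-- def split_with_span_index(sentence: str):
--     # single linear scan over maximal non-whitespace runs; spans come from the scan position
--     out = []
--     n = len(sentence)
--     i = 0
--     while i < n:
--         if sentence[i].isspace():
--             i += 1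
--         else:
--             j = i
--             while j < n and not sentence[j].isspace():
--                 j += 1
--             out.append((sentence[i:j], i, j))
--             i = j
--     return out
-- ===== Notes on version B (the rewrite author's own statement) =====
-- stated objective: alternative
-- what changed: B replaces split() followed by a find() for each word with one linear index scan that detects maximal non-whitespace runs and reads each (word, start, end) directly off the scan position.
import Mathlib
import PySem

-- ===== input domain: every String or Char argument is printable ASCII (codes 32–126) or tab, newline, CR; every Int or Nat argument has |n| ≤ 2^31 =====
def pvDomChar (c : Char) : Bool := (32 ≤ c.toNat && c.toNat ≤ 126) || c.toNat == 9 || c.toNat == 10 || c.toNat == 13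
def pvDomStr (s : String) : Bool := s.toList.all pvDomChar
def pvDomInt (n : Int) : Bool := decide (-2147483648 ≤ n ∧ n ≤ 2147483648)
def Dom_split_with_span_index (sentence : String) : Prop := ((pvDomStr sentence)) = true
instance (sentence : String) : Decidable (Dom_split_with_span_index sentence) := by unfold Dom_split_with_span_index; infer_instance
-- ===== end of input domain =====

-- B replaces split()+find() with one linear scan over the characters, reading each span
-- off the scan position instead of re-searching for the word (alternative algorithm, same cost).


-- ===== PORT A =====
-- words = sentence.split(); for word in words: start = sentence.find(word, search_start); …
def split_with_span_index (sentence : String) : List (String × Int × Int) :=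
  let words := PySem.Str.split₀ sentence
  (words.foldl (fun (st : List (String × Int × Int) × Int) word =>
      let start := PySem.Str.findFrom sentence word st.2 none
      let e := start + PySem.Str.len word
      (st.1 ++ [(word, start, e)], e)) ([], 0)).1

-- ===== PORT B =====
-- outer while over i; inner while advances j over the non-whitespace run (= takeWhile),
-- then appends (sentence[i:j], i, j); ported as structural recursion over the remaining characters.
def splitScanB : List Char → Nat → List (String × Int × Int)
  | [], _ => []
  | c :: rest, i =>
    if PySem.Chars.isspace c then splitScanB rest (i + 1)
    else
      let w := (c :: rest).takeWhile (fun ch => !PySem.Chars.isspace ch)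
      (String.ofList w, (i : Int), (i : Int) + w.length) ::
        splitScanB ((c :: rest).dropWhile (fun ch => !PySem.Chars.isspace ch)) (i + w.length)
  termination_by cs _ => cs.length
  decreasing_by
    · simp
    · simp only [List.dropWhile_cons]
      split
      · exact Nat.lt_succ_of_le (List.length_dropWhile_le _ _)
      · simp_all

def split_with_span_index_alt (sentence : String) : List (String × Int × Int) :=
  splitScanB sentence.toList 0

-- ===== PRECONDITION & SPEC =====
def Spec_split_with_span_index (sentence : String) (out : List (String × Int × Int)) : Prop := out = split_with_span_index_alt sentence
instance (sentence : String) (out : List (String × Int × Int)) : Decidable (Spec_split_with_span_index sentence out) := by unfold Spec_split_with_span_index; infer_instance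

-- ===== CLAIM (what is proved, stated in full; the proofs are below) =====
def Claim_equal_split_with_span_index : Prop := ∀ (sentence : String), Dom_split_with_span_index sentence → Spec_split_with_span_index sentence (split_with_span_index sentence)

-- ===== LEMMAS AND PROOFS =====

-- split₀ skips a leading whitespace character
lemma split₀_cons_space {c : Char} (cs : List Char) (hc : PySem.Chars.isspace c = true) :
    PySem.Chars.split₀ (c :: cs) = PySem.Chars.split₀ cs := by
  simp [PySem.Chars.split₀, PySem.Chars.split₀.go, hc]

-- accumulator lemma for split₀.go
lemma split₀_go_acc (cs : List Char) : ∀ cur acc,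
    PySem.Chars.split₀.go cs cur acc = acc.reverse ++ PySem.Chars.split₀.go cs cur [] := by
  induction cs with
  | nil =>
    intro cur acc
    by_cases h : cur.isEmpty <;> simp [PySem.Chars.split₀.go, h]
  | cons c rest ih =>
    intro cur acc
    by_cases hc : PySem.Chars.isspace c
    · by_cases hcur : cur.isEmpty = true
      · simp only [PySem.Chars.split₀.go, hc, hcur, if_true]
        exact ih [] acc
      · simp only [PySem.Chars.split₀.go, hc, hcur, if_true]
        rw [ih [] (cur.reverse :: acc), ih [] [cur.reverse]]
        simp
    · simp only [PySem.Chars.split₀.go, hc]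
      exact ih (c :: cur) acc

-- split₀.go consumes a maximal non-space run into cur
lemma split₀_go_run (cs : List Char) : ∀ cur acc,
    PySem.Chars.split₀.go cs cur acc =
      PySem.Chars.split₀.go (cs.dropWhile (fun ch => !PySem.Chars.isspace ch))
        ((cs.takeWhile (fun ch => !PySem.Chars.isspace ch)).reverse ++ cur) acc := by
  induction cs with
  | nil => intro cur acc; simp
  | cons c rest ih =>
    intro cur acc
    by_cases hc : PySem.Chars.isspace c
    · simp [hc]
    · simp only [PySem.Chars.split₀.go, hc, List.takeWhile_cons, List.dropWhile_cons,
        Bool.not_eq_eq_eq_not, Bool.not_true]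
      rw [ih (c :: cur) acc]
      simp

-- split₀ pulls off the leading non-space run as the first word
lemma split₀_cons_word {c : Char} (cs : List Char) (hc : PySem.Chars.isspace c = false) :
    PySem.Chars.split₀ (c :: cs) =
      ((c :: cs).takeWhile (fun ch => !PySem.Chars.isspace ch)) ::
        PySem.Chars.split₀ ((c :: cs).dropWhile (fun ch => !PySem.Chars.isspace ch)) := by
  have hrun := split₀_go_run (c :: cs) [] []
  have hwne : (c :: cs).takeWhile (fun ch => !PySem.Chars.isspace ch) ≠ [] := by
    simp [hc]
  show PySem.Chars.split₀.go (c :: cs) [] [] = _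
  rw [hrun]
  cases hdd : (c :: cs).dropWhile (fun ch => !PySem.Chars.isspace ch) with
  | nil =>
    simp [PySem.Chars.split₀.go, PySem.Chars.split₀, hwne]
  | cons c' d' =>
    have hc' : PySem.Chars.isspace c' = true := by
      have hne : (c :: cs).dropWhile (fun ch => !PySem.Chars.isspace ch) ≠ [] := by
        rw [hdd]; simp
      have := List.head_dropWhile_not (fun ch => !PySem.Chars.isspace ch) hne
      simp only [hdd, List.head_cons, Bool.not_eq_eq_eq_not] at this
      simpa using this
    have hcurne :
        (((c :: cs).takeWhile (fun ch => !PySem.Chars.isspace ch)).reverse).isEmpty = false := by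
      simp [hwne]
    simp only [List.append_nil, PySem.Chars.split₀.go, hc', if_true, hcurne,
      Bool.false_eq_true, if_false, List.reverse_reverse]
    rw [split₀_go_acc d' [] [(c :: cs).takeWhile (fun ch => !PySem.Chars.isspace ch)]]
    rw [split₀_cons_space d' hc']
    simp [PySem.Chars.split₀]

-- dropWhile is drop of the takeWhile length
lemma dropWhile_eq_drop (p : Char → Bool) (l : List Char) :
    l.drop (l.takeWhile p).length = l.dropWhile p := by
  induction l with
  | nil => simp
  | cons c t ih => by_cases h : p c <;> simp [h, ih]

-- searching the first word of the run at k, from k0 with only whitespace in [k0, k), lands at k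
lemma find_run_start (s : List Char) (k0 k : Nat) (hk0 : k0 ≤ k) (hk : k < s.length)
    (hsp : ∀ i (h : i < s.length), k0 ≤ i → i < k → PySem.Chars.isspace s[i] = true)
    (hck : PySem.Chars.isspace (s[k]'hk) = false) :
    PySem.Chars.find (s.drop k0) ((s.drop k).takeWhile (fun ch => !PySem.Chars.isspace ch))
      = ((k - k0 : Nat) : Int) := by
  set w := (s.drop k).takeWhile (fun ch => !PySem.Chars.isspace ch) with hw
  have hdk : (s.drop k0).drop (k - k0) = s.drop k := by
    rw [List.drop_drop]; congr 1; omega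
  have hpre : w <+: (s.drop k0).drop (k - k0) := by
    rw [hdk]; exact List.takeWhile_prefix _
  have hwne : w ≠ [] := by
    have h0 : (s.drop k).length > 0 := by simp; omega
    rw [hw]
    cases hde : s.drop k with
    | nil => simp [hde] at h0
    | cons c rest =>
      have hc : c = s[k]'hk := by
        have : (s.drop k)[0]'(by simp [hde]) = s[k + 0]'(by omega) := List.getElem_drop
        simpa [hde] using this
      simp [hc, hck]
  have hinf : w <:+: s.drop k0 := by
    obtain ⟨t, ht⟩ := hpre
    exact ⟨(s.drop k0).take (k - k0), t, by rw [List.append_assoc, ht]; simp⟩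
  have hnn : 0 ≤ PySem.Chars.find (s.drop k0) w := (PySem.Chars.find_nonneg_iff _ _).2 hinf
  obtain ⟨hat, hmin⟩ := PySem.Chars.find_spec hnn
  set v := (PySem.Chars.find (s.drop k0) w).toNat with hv
  have hvk : ¬ v < k - k0 := by
    intro hlt
    have hpre' : w <+: (s.drop k0).drop v := hat
    have hvlen : k0 + v < s.length := by omega
    have hdv : (s.drop k0).drop v = s.drop (k0 + v) := by rw [List.drop_drop]
    rw [hdv] at hpre'
    have h0 : 0 < w.length := List.length_pos_iff.2 hwne
    have hget := hpre'.getElem h0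
    have hmem : w[0]'h0 ∈ (s.drop k).takeWhile (fun ch => !PySem.Chars.isspace ch) := by
      rw [← hw]; exact List.getElem_mem h0
    have hP := List.mem_takeWhile_imp hmem
    rw [hget] at hP
    simp only [List.getElem_drop, Nat.add_zero] at hP
    rw [hsp (k0 + v) hvlen (by omega) (by omega)] at hP
    simp at hP
  have hvk' : ¬ k - k0 < v := fun hlt => hmin (k - k0) hlt hpre
  have hveq : v = k - k0 := by omega
  omega

-- the A-side fold over the words of the suffix at k equals B's scan of that suffix
lemma fold_eq_scan (sentence : String) :
    ∀ (fuel k k0 : Nat) (out : List (String × Int × Int)),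
      sentence.toList.length - k ≤ fuel → k0 ≤ k → k ≤ sentence.toList.length →
      (∀ i (h : i < sentence.toList.length), k0 ≤ i → i < k →
          PySem.Chars.isspace sentence.toList[i] = true) →
      (((PySem.Chars.split₀ (sentence.toList.drop k)).map String.ofList).foldl
          (fun (st : List (String × Int × Int) × Int) word =>
            let start := PySem.Str.findFrom sentence word st.2 none
            let e := start + PySem.Str.len word
            (st.1 ++ [(word, start, e)], e)) (out, (k0 : Int))).1
        = out ++ splitScanB (sentence.toList.drop k) k := by
  intro fuel
  induction fuel with
  | zero =>
    intro k k0 out hfuel hk0 hk hsp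
    have : sentence.toList.drop k = [] := by
      apply List.drop_eq_nil_of_le; omega
    simp [this, PySem.Chars.split₀, PySem.Chars.split₀.go, splitScanB]
  | succ fuel ih =>
    intro k k0 out hfuel hk0 hk hsp
    cases hdk : sentence.toList.drop k with
    | nil => simp [PySem.Chars.split₀, PySem.Chars.split₀.go, splitScanB]
    | cons c rest =>
      have hklt : k < sentence.toList.length := by
        by_contra h
        have : sentence.toList.drop k = [] := List.drop_eq_nil_of_le (by omega)
        rw [this] at hdk; cases hdk
      have hck : c = sentence.toList[k]'hklt := by
        have : (sentence.toList.drop k)[0]'(by simp [hdk]) =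
            sentence.toList[k + 0]'(by omega) := List.getElem_drop
        simpa [hdk] using this
      have hrest : rest = sentence.toList.drop (k + 1) := by
        have h1 : (sentence.toList.drop k).tail = sentence.toList.drop (k + 1) :=
          List.tail_drop
        simpa [hdk] using h1
      by_cases hc : PySem.Chars.isspace c = true
      · -- whitespace: both sides step to k+1
        rw [split₀_cons_space rest hc]
        have hB : splitScanB (c :: rest) k =
            splitScanB (sentence.toList.drop (k + 1)) (k + 1) := by
          rw [splitScanB, if_pos hc, hrest]
        rw [hB, hrest]
        apply ih (k + 1) k0 out (by omega) (by omega) (by omega)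
        intro i h hi1 hi2
        rcases Nat.lt_or_ge i k with h' | h'
        · exact hsp i h hi1 h'
        · have : i = k := by omega
          subst this; rw [← hck]; exact hc
      · -- non-whitespace: A finds the run start at k, both sides emit the word and step past it
        have hcf : PySem.Chars.isspace c = false := by simpa using hc
        rw [split₀_cons_word rest hcf]
        set w := (c :: rest).takeWhile (fun ch => !PySem.Chars.isspace ch) with hwdef
        have hwk : w = (sentence.toList.drop k).takeWhile (fun ch => !PySem.Chars.isspace ch) := by
          rw [hdk]
        have hm1 : 1 ≤ w.length := by
          have : w ≠ [] := by simp [hwdef, hcf]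
          exact List.length_pos_iff.2 this
        have hmle : w.length ≤ sentence.toList.length - k := by
          have h1 : w.length ≤ (sentence.toList.drop k).length := by
            rw [hwk]; exact (List.takeWhile_prefix _).length_le
          simpa using h1
        have hfind : PySem.Str.findFrom sentence (String.ofList w) (k0 : Int) none = (k : Int) := by
          rw [PySem.Str.findFrom_eq, String.toList_ofList]
          rw [PySem.Chars.findFrom_natCast _ _ k0 (by omega)]
          rw [show PySem.Chars.find (sentence.toList.drop k0) w = ((k - k0 : Nat) : Int) from by
            rw [hwk]
            exact find_run_start sentence.toList k0 k hk0 hklt hsp (by rw [← hck]; exact hcf)]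
          have hne : ¬ (((k - k0 : Nat) : Int) = -1) := by omega
          rw [if_neg hne]
          omega
        have hdrop : (c :: rest).dropWhile (fun ch => !PySem.Chars.isspace ch) =
            sentence.toList.drop (k + w.length) := by
          rw [← hdk, ← dropWhile_eq_drop, ← hwk, List.drop_drop]
        simp only [List.map_cons, List.foldl_cons, hfind, PySem.Str.len_eq, String.toList_ofList]
        have hstep :
            ((k : Int) + (w.length : Int)) = ((k + w.length : Nat) : Int) := by push_cast; ring
        rw [hstep, hdrop]
        have hIH := ih (k + w.length) (k + w.length)
          (out ++ [(String.ofList w, (k : Int), ((k + w.length : Nat) : Int))])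
          (by omega) (by omega) (by omega) (by omega)
        simp only [PySem.Str.len_eq] at hIH
        rw [hIH]
        have hBstep : splitScanB (c :: rest) k =
            (String.ofList w, (k : Int), (k : Int) + (w.length : Int)) ::
              splitScanB (sentence.toList.drop (k + w.length)) (k + w.length) := by
          rw [splitScanB, if_neg (by simp [hcf]), ← hwdef, hdrop]
        rw [hBstep, hstep]
        simp

-- ===== VERDICT (by name: the statement is the Claim_ definition above) =====
theorem split_with_span_index_spec : Claim_equal_split_with_span_index := by
  intro sentence _
  show split_with_span_index sentence = split_with_span_index_alt sentence
  unfold split_with_span_index split_with_span_index_alt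
  have h := fold_eq_scan sentence sentence.toList.length 0 0 [] (by omega) (by omega) (by omega)
    (by omega)
  simpa [PySem.Str.split₀] using h
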